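-- pv_equiv track=rewrite | github.com/EliPreston/Python-Mini-Projects | Python Problems 109/problems.py | winning_card
-- ===== SOURCE A (Python) =====
-- def winning_card(cards, trump=None):
--
--     ranks = {
--         'two': 2, 'three': 3, 'four': 4,
--         'five': 5, 'six': 6, 'seven': 7,
--         'eight': 8, 'nine': 9, 'ten': 10,
--         'jack': 11, 'queen': 12, 'king': 13,
--         'ace': 14
--         }
--
--     currentWinner = cards[0]
--     currentWinnerRank = ranks[cards[0][0]]
--
--     if trump == None:
--         trump = cards[0][1]
--     else:
--         trumpNotFound = True
--         for i in range(len(cards)):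
--             if cards[i][1] == trump:
--                 currentWinner = cards[i]
--                 currentWinnerRank = ranks[cards[i][0]]
--                 trumpNotFound = False
--                 break
--         if trumpNotFound:
--             trump = currentWinner[1]
--
--     for i in cards:
--         currentRank = ranks[i[0]]
--         currentSuit = i[1]
--
--         if currentSuit == trump:
--             if currentRank > currentWinnerRank:
--                 currentWinner = i
--                 currentWinnerRank = currentRank
--
--     return currentWinner
-- ===== SOURCE B (Python) =====
-- RANKS = {
--     'two': 2, 'three': 3, 'four': 4,
--     'five': 5, 'six': 6, 'seven': 7,
--     'eight': 8, 'nine': 9, 'ten': 10,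
--     'jack': 11, 'queen': 12, 'king': 13,
--     'ace': 14
--     }
--
-- def winning_card(cards, trump=None):
--     first = cards[0]
--     suits = {c[1] for c in cards}
--     eff = trump if (trump is not None and trump in suits) else first[1]
--     ordered = sorted(cards, key=lambda c: RANKS[c[0]], reverse=True)
--     return next(c for c in ordered if c[1] == eff)
-- ===== Notes on version B (the rewrite author's own statement) =====
-- stated objective: alternative
-- what changed: A's break-search for the first trump card plus a running max-scan is replaced by building the set of suits present, resolving the effective trump against it, stably sorting the cards by rank descending and returning the first card of that suit.
import Mathlib
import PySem

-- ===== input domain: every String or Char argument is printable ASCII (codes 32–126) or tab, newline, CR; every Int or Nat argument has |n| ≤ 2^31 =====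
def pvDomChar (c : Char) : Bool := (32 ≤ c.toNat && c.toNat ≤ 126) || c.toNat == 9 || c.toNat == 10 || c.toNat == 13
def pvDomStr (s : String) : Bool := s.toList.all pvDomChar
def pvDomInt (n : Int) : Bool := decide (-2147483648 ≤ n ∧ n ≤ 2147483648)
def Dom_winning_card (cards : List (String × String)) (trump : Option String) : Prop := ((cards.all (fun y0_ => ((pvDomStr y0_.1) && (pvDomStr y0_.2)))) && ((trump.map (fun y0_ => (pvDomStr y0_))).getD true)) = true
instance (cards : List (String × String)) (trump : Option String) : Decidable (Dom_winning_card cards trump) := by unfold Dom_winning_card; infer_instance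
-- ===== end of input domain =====

-- B replaces A's break-search plus max-scan with: suit set, stable descending sort by rank,
-- first card of the effective trump suit (objective: alternative decomposition, same results).

-- shared helper: the rank table (a dict literal in both Pythons)
def pvRanks : PySem.Dict String Int :=
  PySem.Dict.ofList [("two", 2), ("three", 3), ("four", 4), ("five", 5), ("six", 6),
    ("seven", 7), ("eight", 8), ("nine", 9), ("ten", 10), ("jack", 11), ("queen", 12),
    ("king", 13), ("ace", 14)]

-- ranks[c[0]]; total via getD, exact under Pre_ (which demands the key be present)
def pvRank (c : String × String) : Int := (pvRanks.get? c.1).getD 0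

-- ===== PORT A =====
-- A-side helper: the body of A's final for-loop (suit test, then strict rank comparison)
def pvStepA (tr : String) (st : (String × String) × Int) (i : String × String) :
    (String × String) × Int :=
  let r := pvRank i
  if i.2 == tr then (if decide (st.2 < r) then (i, r) else st) else st

def winning_card (cards : List (String × String)) (trump : Option String) : String × String :=
  let cw0 := PySem.List.pyGetD cards 0 ("", "")
  let cwr0 := pvRank cw0
  -- the trump-resolution branch: A's break-search over range(len(cards)) is the first match
  let s : (String × String) × Int × String :=
    match trump with
    | none => (cw0, cwr0, cw0.2)
    | some t =>
      match cards.find? (fun cc => cc.2 == t) with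
      | some cc => (cc, pvRank cc, t)
      | none => (cw0, cwr0, cw0.2)
  (cards.foldl (pvStepA s.2.2) (s.1, s.2.1)).1

-- ===== PORT B =====
def winning_card_alt (cards : List (String × String)) (trump : Option String) : String × String :=
  let first := PySem.List.pyGetD cards 0 ("", "")
  let suits : PySem.Set String := PySem.Set.ofList (cards.map (fun c => c.2))
  let eff : String :=
    match trump with
    | some t => if PySem.Set.contains suits t then t else first.2
    | none => first.2
  let ordered := PySem.List.sorted cards pvRank true
  (ordered.find? (fun c => c.2 == eff)).getD ("", "")

-- ===== PRECONDITION & SPEC =====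
-- Pre_ excludes exactly the inputs where the Python A raises: the empty list (IndexError on
-- cards[0]) and any card whose rank name is not a key of the rank table (KeyError).
def Pre_winning_card (cards : List (String × String)) (trump : Option String) : Prop :=
  cards ≠ [] ∧ ∀ c ∈ cards, c.1 ∈ ["two", "three", "four", "five", "six", "seven", "eight",
    "nine", "ten", "jack", "queen", "king", "ace"]
instance (cards : List (String × String)) (trump : Option String) : Decidable (Pre_winning_card cards trump) := by unfold Pre_winning_card; infer_instance

def pvWitness_winning_card : (List (String × String)) × Option String :=
  ([("ten", "hearts"), ("ace", "spades"), ("king", "hearts")], some "hearts")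

def Spec_winning_card (cards : List (String × String)) (trump : Option String) (out : String × String) : Prop := out = winning_card_alt cards trump
instance (cards : List (String × String)) (trump : Option String) (out : String × String) : Decidable (Spec_winning_card cards trump out) := by unfold Spec_winning_card; infer_instance

-- ===== CLAIM (what is proved, stated in full; the proofs are below) =====
def Claim_equal_winning_card : Prop := ∀ (cards : List (String × String)) (trump : Option String), Dom_winning_card cards trump → Pre_winning_card cards trump → Spec_winning_card cards trump (winning_card cards trump)

-- ===== LEMMAS AND PROOFS =====

-- generic forms of the two loops, over an abstract predicate p and key
def pvStepN {α : Type} (p : α → Bool) (key : α → Int) (st : α × Int) (i : α) : α × Int :=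
  let r := key i
  if p i then (if decide (st.2 < r) then (i, r) else st) else st

def pvStepO {α : Type} (p : α → Bool) (key : α → Int) (o : Option (α × Int)) (i : α) :
    Option (α × Int) :=
  match o with
  | none => if p i then some (i, key i) else none
  | some st => some (pvStepN p key st i)

theorem pvStepA_eq (tr : String) :
    pvStepA tr = pvStepN (fun i => i.2 == tr) pvRank := rfl

theorem pv_insertBy_cons {α : Type} (bef : α → α → Bool) (x y : α) (ys : List α) :
    PySem.List.insertBy bef x (y :: ys) =
      if bef x y then x :: y :: ys else y :: PySem.List.insertBy bef x ys := rfl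

-- inserting into a descending list splits it at the key boundary
theorem pv_insertBy_split {α : Type} (key : α → Int) (x : α) (s : List α)
    (hs : s.Pairwise (fun a b => key b ≤ key a)) :
    ∃ s₁ s₂, s = s₁ ++ s₂ ∧
      PySem.List.insertBy (fun a b => decide (key b < key a)) x s = s₁ ++ x :: s₂ ∧
      (∀ y ∈ s₁, key x ≤ key y) ∧ (∀ y ∈ s₂, key y < key x) := by
  induction s with
  | nil => exact ⟨[], [], rfl, rfl, by simp, by simp⟩
  | cons y ys ih =>
    rcases List.pairwise_cons.mp hs with ⟨hy, hrest⟩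
    rw [pv_insertBy_cons]
    by_cases hlt : key y < key x
    · refine ⟨[], y :: ys, rfl, by simp [hlt], by simp, ?_⟩
      intro z hz
      rcases List.mem_cons.mp hz with rfl | hz
      · exact hlt
      · exact lt_of_le_of_lt (hy z hz) hlt
    · rcases ih hrest with ⟨s₁, s₂, hsplit, hins, h₁, h₂⟩
      refine ⟨y :: s₁, s₂, by simp [hsplit], by simp [hlt, hins], ?_, h₂⟩
      intro z hz
      rcases List.mem_cons.mp hz with rfl | hz
      · omega
      · exact h₁ z hz

theorem pv_foldl_stepO_some {α : Type} (p : α → Bool) (key : α → Int) :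
    ∀ (l : List α) (st : α × Int),
      l.foldl (pvStepO p key) (some st) = some (l.foldl (pvStepN p key) st) := by
  intro l
  induction l with
  | nil => intro st; rfl
  | cons x xs ih => intro st; simpa [pvStepO] using ih (pvStepN p key st x)

theorem pv_find?_foldl_stepO {α : Type} (p : α → Bool) (key : α → Int) :
    ∀ (l : List α) (c : α), l.find? p = some c →
      l.foldl (pvStepO p key) none = some (l.foldl (pvStepN p key) (c, key c)) := by
  intro l
  induction l with
  | nil => intro c h; simp at h
  | cons x xs ih =>
    intro c h
    by_cases hx : p x
    · have hc : x = c := by simpa [List.find?_cons_of_pos hx] using h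
      subst hc
      simp only [List.foldl_cons, pvStepO, hx, if_pos]
      rw [pv_foldl_stepO_some]
      have : pvStepN p key (x, key x) x = (x, key x) := by
        simp [pvStepN]
      rw [this]
    · have h' : xs.find? p = some c := by simpa [List.find?_cons_of_neg hx] using h
      have hstep : pvStepN p key (c, key c) x = (c, key c) := by simp [pvStepN, hx]
      simp only [List.foldl_cons, pvStepO, hx, if_neg, Bool.false_eq_true, not_false_iff]
      rw [ih c h', hstep]

theorem pv_foldl_stepO_none {α : Type} (p : α → Bool) (key : α → Int) :
    ∀ (l : List α), (∀ y ∈ l, ¬ p y) → l.foldl (pvStepO p key) none = none := by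
  intro l
  induction l with
  | nil => intro _; rfl
  | cons x xs ih =>
    intro h
    have hx : ¬ p x := h x (by simp)
    simp only [List.foldl_cons, pvStepO, hx, if_neg, Bool.false_eq_true, not_false_iff]
    exact ih (fun y hy => h y (List.mem_cons_of_mem _ hy))

theorem pv_foldl_stepN_inv {α : Type} (p : α → Bool) (key : α → Int) :
    ∀ (l : List α) (st : α × Int), p st.1 → st.2 = key st.1 →
      p (l.foldl (pvStepN p key) st).1 ∧
      (l.foldl (pvStepN p key) st).2 = key (l.foldl (pvStepN p key) st).1 ∧
      st.2 ≤ (l.foldl (pvStepN p key) st).2 ∧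
      ∀ y ∈ l, p y → key y ≤ (l.foldl (pvStepN p key) st).2 := by
  intro l
  induction l with
  | nil => intro st h1 h2; exact ⟨h1, h2, le_refl _, by simp⟩
  | cons x xs ih =>
    intro st h1 h2
    by_cases hx : p x
    · by_cases hlt : st.2 < key x
      · have hstep : pvStepN p key st x = (x, key x) := by simp [pvStepN, hx, hlt]
        simp only [List.foldl_cons, hstep]
        rcases ih (x, key x) hx rfl with ⟨i1, i2, i3, i4⟩
        refine ⟨i1, i2, le_trans (le_of_lt hlt) i3, ?_⟩
        intro y hy hpy
        rcases List.mem_cons.mp hy with rfl | hy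
        · exact i3
        · exact i4 y hy hpy
      · have hstep : pvStepN p key st x = st := by simp [pvStepN, hx, hlt]
        simp only [List.foldl_cons, hstep]
        rcases ih st h1 h2 with ⟨i1, i2, i3, i4⟩
        refine ⟨i1, i2, i3, ?_⟩
        intro y hy hpy
        rcases List.mem_cons.mp hy with rfl | hy
        · exact le_trans (not_lt.mp hlt) i3
        · exact i4 y hy hpy
    · have hstep : pvStepN p key st x = st := by simp [pvStepN, hx]
      simp only [List.foldl_cons, hstep]
      rcases ih st h1 h2 with ⟨i1, i2, i3, i4⟩
      refine ⟨i1, i2, i3, ?_⟩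
      intro y hy hpy
      rcases List.mem_cons.mp hy with rfl | hy
      · exact absurd hpy hx
      · exact i4 y hy hpy

-- the heart of the equivalence: the first p-match of the stable descending sort is the
-- running first-strict-maximum of A's scan
theorem pv_sorted_find? {α : Type} (p : α → Bool) (key : α → Int) :
    ∀ (l : List α),
      (PySem.List.sorted l key true).find? p =
        (l.foldl (pvStepO p key) none).map (fun st => st.1) := by
  intro l
  induction l using List.reverseRecOn with
  | nil => rfl
  | append_singleton l x ih =>
    have hsort : PySem.List.sorted (l ++ [x]) key true =
        PySem.List.insertBy (fun a b => decide (key b < key a)) x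
          (PySem.List.sorted l key true) := by
      rw [PySem.List.sorted_rev_eq_foldl_insertBy, PySem.List.sorted_rev_eq_foldl_insertBy,
        List.foldl_append]
      rfl
    have hpair : (PySem.List.sorted l key true).Pairwise (fun a b => key b ≤ key a) :=
      PySem.List.sorted_pairwise_rev l key
    rcases pv_insertBy_split key x _ hpair with ⟨s₁, s₂, hsplit, hins, h₁, h₂⟩
    have hmemS : ∀ y, y ∈ PySem.List.sorted l key true ↔ y ∈ l := by
      intro y; exact PySem.List.mem_sorted l key true y
    rw [hsort, hins, List.foldl_append]
    cases hg : l.foldl (pvStepO p key) none with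
    | none =>
      have hnone : (PySem.List.sorted l key true).find? p = none := by
        rw [ih, hg]; rfl
      have hnop : ∀ y ∈ PySem.List.sorted l key true, ¬ p y := by
        intro y hy hpy
        exact (List.find?_eq_none.mp hnone y hy) hpy
      have hns₁ : s₁.find? p = none := List.find?_eq_none.mpr
        (fun y hy => hnop y (by rw [hsplit]; exact List.mem_append_left _ hy))
      have hns₂ : s₂.find? p = none := List.find?_eq_none.mpr
        (fun y hy => hnop y (by rw [hsplit]; exact List.mem_append_right _ hy))
      by_cases hpx : p x
      · simp [List.find?_append, hns₁, pvStepO, hpx]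
      · simp [List.find?_append, hns₁, hns₂, pvStepO, hpx]
    | some st =>
      obtain ⟨e, k⟩ := st
      have hsome : (PySem.List.sorted l key true).find? p = some e := by
        rw [ih, hg]; rfl
      have hpe : p e := List.find?_some hsome
      have hinv : k = key e ∧ ∀ y ∈ l, p y → key y ≤ key e := by
        cases hfind : l.find? p with
        | none =>
          rw [pv_foldl_stepO_none p key l (fun y hy hpy =>
            (List.find?_eq_none.mp hfind y hy) hpy)] at hg
          exact absurd hg (by simp)
        | some c =>
          rw [pv_find?_foldl_stepO p key l c hfind] at hg
          have hpc : p c := List.find?_some hfind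
          rcases pv_foldl_stepN_inv p key l (c, key c) hpc rfl with ⟨_, i2, _, i4⟩
          have heq : (e, k) = l.foldl (pvStepN p key) (c, key c) := by
            exact (Option.some.injEq _ _ ▸ hg).symm
          rw [← heq] at i2 i4
          exact ⟨i2, fun y hy hpy => le_trans (i4 y hy hpy) (le_of_eq i2)⟩
      rcases hinv with ⟨hek, hmax⟩
      have hesplit : e ∈ s₁ ++ s₂ := by
        rw [← hsplit]
        exact (hmemS e).mpr ((hmemS e).mp (List.mem_of_find?_eq_some hsome))
      by_cases hpx : p x
      · by_cases hlt : k < key x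
        · -- the new card wins: nothing in s₁ matches p
          have hns₁ : s₁.find? p = none := by
            apply List.find?_eq_none.mpr
            intro y hy hpy
            have hyl : y ∈ l := (hmemS y).mp (by rw [hsplit]; exact List.mem_append_left _ hy)
            have hle : key y ≤ key e := hmax y hyl hpy
            have hge : key x ≤ key y := h₁ y hy
            rw [hek] at hlt
            omega
          simp [List.find?_append, hns₁, List.find?_cons_of_pos hpx, pvStepO, pvStepN,
            hpx, hlt]
        · -- old winner stands: e is in s₁
          have hes₁ : e ∈ s₁ := by
            rcases List.mem_append.mp hesplit with h | h
            · exact h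
            · exfalso
              have := h₂ e h
              rw [hek] at hlt
              omega
          have hfs₁ : s₁.find? p = some e := by
            cases hf : s₁.find? p with
            | none =>
              exact absurd (List.find?_eq_none.mp hf e hes₁) (by simp [hpe])
            | some e' =>
              have h' : (s₁ ++ s₂).find? p = some e' := by
                rw [List.find?_append, hf]; rfl
              rw [← hsplit, hsome] at h'
              simpa using h'.symm
          simp [List.find?_append, hfs₁, pvStepO, pvStepN, hpx, hlt]
      · -- x does not match: the combined find? is the old one
        have h' : (s₁ ++ x :: s₂).find? p = (s₁ ++ s₂).find? p := by
          rw [List.find?_append, List.find?_append, List.find?_cons_of_neg hpx]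
        rw [h', ← hsplit, hsome]
        simp [pvStepO, pvStepN, hpx]

-- the two ports compute the same effective trump and A's scan starts at the first card of
-- that suit; assemble
theorem pv_main (cards : List (String × String)) (trump : Option String)
    (hne : cards ≠ []) :
    winning_card cards trump = winning_card_alt cards trump := by
  obtain ⟨c, rest, rfl⟩ : ∃ c rest, cards = c :: rest := by
    cases cards with
    | nil => exact absurd rfl hne
    | cons c rest => exact ⟨c, rest, rfl⟩
  have hgoal : ∀ (eff : String) (c0 : (String × String)),
      (c :: rest).find? (fun y => y.2 == eff) = some c0 →
      ((c :: rest).foldl (pvStepA eff) (c0, pvRank c0)).1 =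
        ((PySem.List.sorted (c :: rest) pvRank true).find? (fun y => y.2 == eff)).getD
          ("", "") := by
    intro eff c0 hfind
    rw [pvStepA_eq, pv_sorted_find?,
      pv_find?_foldl_stepO (fun y => y.2 == eff) pvRank _ c0 hfind]
    rfl
  show winning_card (c :: rest) trump = winning_card_alt (c :: rest) trump
  cases trump with
  | none =>
    have hfind : (c :: rest).find? (fun y => y.2 == c.2) = some c := by
      simp [List.find?_cons_of_pos]
    simp only [winning_card, winning_card_alt, PySem.List.pyGetD_zero_cons]
    simpa using hgoal c.2 c hfind
  | some t =>
    cases hf : (c :: rest).find? (fun y => y.2 == t) with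
    | some cc =>
      have hz : cc ∈ c :: rest := List.mem_of_find?_eq_some hf
      have hzt : cc.2 = t := by simpa using List.find?_some hf
      have hctrue :
          (PySem.Set.ofList (List.map (fun c => c.2) (c :: rest))).contains t = true :=
        (PySem.Set.contains_iff _ _).mpr
          ((PySem.Set.mem_ofList _ _).mpr (List.mem_map.mpr ⟨cc, hz, hzt⟩))
      simp only [winning_card, winning_card_alt, PySem.List.pyGetD_zero_cons, hf, hctrue]
      simpa using hgoal t cc hf
    | none =>
      have hall : ∀ y ∈ (c :: rest).map (fun y => y.2), y ≠ t := by
        intro y hy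
        rcases List.mem_map.mp hy with ⟨z, hz, rfl⟩
        have := List.find?_eq_none.mp hf z hz
        simpa using this
      have hcfalse :
          (PySem.Set.ofList (List.map (fun c => c.2) (c :: rest))).contains t = false := by
        rw [Bool.eq_false_iff]
        intro hc
        exact hall t ((PySem.Set.mem_ofList _ _).mp ((PySem.Set.contains_iff _ _).mp hc)) rfl
      have hfind : (c :: rest).find? (fun y => y.2 == c.2) = some c := by
        simp [List.find?_cons_of_pos]
      simp only [winning_card, winning_card_alt, PySem.List.pyGetD_zero_cons, hf, hcfalse]
      simpa using hgoal c.2 c hfind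

-- ===== VERDICT (by name: the statement is the Claim_ definition above) =====
theorem winning_card_spec : Claim_equal_winning_card := by
  intro cards trump _ hpre
  exact pv_main cards trump hpre.1
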